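-- pv_equiv track=rewrite | github.com/tomas-skalicky/interview_puzzles | src/main/python/com/skalicky/python/interviewpuzzles/find_valid_ordering_of_courses_if_exists.py | sort_courses_by_prereq_count_by_radix
-- ===== SOURCE A (Python) =====
-- from typing import Dict, List, Set
--
-- def sort_courses_by_prereq_count_by_radix(course_to_prereqs: Dict[str, List[str]]):
--     courses_and_prereq_counts: List[Set[str]] = [set()]
--     for course in course_to_prereqs:
--         prereq_count = len(course_to_prereqs[course])
--         while len(courses_and_prereq_counts) <= prereq_count:
--             courses_and_prereq_counts.append(set())
--         courses_and_prereq_counts[prereq_count].add(course)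
--     return courses_and_prereq_counts
-- ===== SOURCE B (Python) =====
-- def sort_courses_by_prereq_count_by_radix(course_to_prereqs):
--     max_count = max((len(p) for p in course_to_prereqs.values()), default=0)
--     return [{course for course, prereqs in course_to_prereqs.items() if len(prereqs) == k}
--             for k in range(max_count + 1)]
-- ===== Notes on version B (the rewrite author's own statement) =====
-- stated objective: alternative
-- what changed: B computes the maximum prerequisite count first and then makes one scan per bucket index, collecting with a set comprehension the courses having exactly k prerequisites for each k in 0..max, instead of A's single pass that grows a bucket list on demand and inserts each course into its bucket.
import Mathlib
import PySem

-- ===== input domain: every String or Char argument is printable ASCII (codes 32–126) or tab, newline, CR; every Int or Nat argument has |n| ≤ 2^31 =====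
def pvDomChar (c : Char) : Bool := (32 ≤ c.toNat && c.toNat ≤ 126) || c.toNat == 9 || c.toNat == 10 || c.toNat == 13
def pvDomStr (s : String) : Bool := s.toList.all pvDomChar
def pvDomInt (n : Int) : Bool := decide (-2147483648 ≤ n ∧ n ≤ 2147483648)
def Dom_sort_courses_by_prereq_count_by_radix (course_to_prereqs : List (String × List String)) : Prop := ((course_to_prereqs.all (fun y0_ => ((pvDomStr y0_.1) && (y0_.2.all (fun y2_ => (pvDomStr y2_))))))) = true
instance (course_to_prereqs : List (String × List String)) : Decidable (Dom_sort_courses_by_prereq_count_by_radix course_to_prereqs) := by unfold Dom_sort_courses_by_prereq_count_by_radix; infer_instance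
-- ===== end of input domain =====

-- B replaces A's grow-buckets-on-demand single pass by one scan per bucket index (compute the max
-- count, then for each k collect the courses with exactly k prerequisites); objective: alternative.

-- ===== PORT A =====
-- the inner 'while len(...) <= prereq_count: append(set())' loop of A
def svExtend (courses_and_prereq_counts : List (List String)) (prereq_count : Int) : List (List String) :=
  if (courses_and_prereq_counts.length : Int) ≤ prereq_count then
    svExtend (courses_and_prereq_counts ++ [(PySem.Set.empty : List String)]) prereq_count
  else courses_and_prereq_counts
termination_by (prereq_count + 1 - courses_and_prereq_counts.length).toNat
decreasing_by simp [List.length_append]; omega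

def sort_courses_by_prereq_count_by_radix (course_to_prereqs : List (String × List String)) : List (List String) :=
  let d := PySem.Dict.ofList course_to_prereqs
  d.keys.foldl
    (fun acc course =>
      let prereq_count : Int := ((d.getD course []).length : Int)
      let acc2 := svExtend acc prereq_count
      PySem.List.pySetD acc2 prereq_count
        (PySem.Set.add (PySem.List.pyGetD acc2 prereq_count (PySem.Set.empty : List String)) course))
    [(PySem.Set.empty : List String)]

-- ===== PORT B =====
def sort_courses_by_prereq_count_by_radix_alt (course_to_prereqs : List (String × List String)) : List (List String) :=
  let d := PySem.Dict.ofList course_to_prereqs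
  let max_count : Int := (PySem.List.max? (d.values.map (fun p => ((p.length : Int)))) (fun x => x)).getD 0
  (PySem.List.pyRange 0 (max_count + 1) 1).map
    (fun k => PySem.Set.ofList ((d.items.filter (fun kv => ((kv.2.length : Int)) == k)).map Prod.fst))

-- ===== PRECONDITION & SPEC =====
def Spec_sort_courses_by_prereq_count_by_radix (course_to_prereqs : List (String × List String)) (out : List (List String)) : Prop := out = sort_courses_by_prereq_count_by_radix_alt course_to_prereqs
instance (course_to_prereqs : List (String × List String)) (out : List (List String)) : Decidable (Spec_sort_courses_by_prereq_count_by_radix course_to_prereqs out) := by unfold Spec_sort_courses_by_prereq_count_by_radix; infer_instance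

-- ===== CLAIM (what is proved, stated in full; the proofs are below) =====
def Claim_equal_sort_courses_by_prereq_count_by_radix : Prop := ∀ (course_to_prereqs : List (String × List String)), Dom_sort_courses_by_prereq_count_by_radix course_to_prereqs → Spec_sort_courses_by_prereq_count_by_radix course_to_prereqs (sort_courses_by_prereq_count_by_radix course_to_prereqs)

-- ===== LEMMAS AND PROOFS =====

-- Nat-level model of A's loop body
def svStepA (acc : List (List String)) (kv : String × List String) : List (List String) :=
  let E := acc ++ List.replicate (kv.2.length + 1 - acc.length) ([] : List String)
  E.set kv.2.length (PySem.Set.add (E.getD kv.2.length []) kv.1)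

theorem svExtend_natCast (acc : List (List String)) (n : Nat) :
    svExtend acc (n : Int) = acc ++ List.replicate (n + 1 - acc.length) ([] : List String) := by
  rw [svExtend]
  by_cases h : acc.length ≤ n
  · rw [if_pos (by exact_mod_cast h)]
    rw [svExtend_natCast (acc ++ [(PySem.Set.empty : List String)]) n]
    rw [List.append_assoc]
    congr 1
    have h2 : n + 1 - acc.length = (n + 1 - (acc ++ [(PySem.Set.empty : List String)]).length) + 1 := by
      simp [List.length_append]; omega
    rw [h2, List.replicate_succ]
    rfl
  · rw [if_neg (by exact_mod_cast h)]
    have : n + 1 - acc.length = 0 := by omega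
    simp [this]
termination_by (n + 1 - acc.length)
decreasing_by simp [List.length_append]; omega

theorem svStepA_length (acc : List (List String)) (kv : String × List String) :
    (svStepA acc kv).length = max acc.length (kv.2.length + 1) := by
  simp [svStepA]
  omega

-- max of an Int-cast list is the cast of the Nat fold
theorem foldl_max_cast (l : List (String × List String)) (a : Nat) :
    (l.map (fun kv => ((kv.2.length : Int)))).foldl max ((a : Nat) : Int)
      = ((l.foldl (fun m kv => max m kv.2.length) a : Nat) : Int) := by
  induction l generalizing a with
  | nil => rfl
  | cons x t ih =>
    simp only [List.map_cons, List.foldl_cons]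
    rw [← Nat.cast_max, ih]

theorem foldl_max_shift (ps : List (String × List String)) (a : Nat) :
    ps.foldl (fun m kv => max m (kv.2.length + 1)) (a + 1)
      = (ps.foldl (fun m kv => max m kv.2.length) a) + 1 := by
  induction ps generalizing a with
  | nil => rfl
  | cons kv t ih =>
    simp only [List.foldl_cons]
    have h : max (a + 1) (kv.2.length + 1) = max a kv.2.length + 1 := by omega
    rw [h, ih]

-- port A, reduced to the Nat-level fold over d.items
theorem portA_eq (cps : List (String × List String)) :
    sort_courses_by_prereq_count_by_radix cps
      = (PySem.Dict.ofList cps).items.foldl svStepA [[]] := by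
  have hnd : (PySem.Dict.ofList cps).keys.Nodup := PySem.Dict.nodup_keys_ofList cps
  have expand : sort_courses_by_prereq_count_by_radix cps
      = ((PySem.Dict.ofList cps).keys.foldl
          (fun acc course =>
            PySem.List.pySetD (svExtend acc (((PySem.Dict.ofList cps).getD course []).length : Int))
              (((PySem.Dict.ofList cps).getD course []).length : Int)
              (PySem.Set.add
                (PySem.List.pyGetD (svExtend acc (((PySem.Dict.ofList cps).getD course []).length : Int))
                  (((PySem.Dict.ofList cps).getD course []).length : Int) (PySem.Set.empty : List String))
                course))
          [(PySem.Set.empty : List String)]) := rfl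
  rw [expand]
  simp only [PySem.Dict.keys, List.foldl_map]
  apply PySem.List.foldl_congr_mem
  intro acc kv hkv
  have hget : (PySem.Dict.ofList cps).getD kv.1 [] = kv.2 :=
    PySem.Dict.getD_of_mem_items (PySem.Dict.ofList cps) (by simpa using hkv) hnd []
  simp only [hget, svExtend_natCast, PySem.List.pySetD_natCast, PySem.List.pyGetD_natCast,
    svStepA, PySem.Set.empty]

-- getD through right-padding with empty buckets
theorem getD_append_replicate (acc : List (List String)) (m k : Nat) :
    (acc ++ List.replicate m ([] : List String)).getD k [] = acc.getD k [] := by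
  by_cases h : k < acc.length
  · rw [List.getD, List.getD, List.getElem?_append_left h]
  · rw [List.getD, List.getD, List.getElem?_append_right (by omega)]
    rw [List.getElem?_eq_none (show acc.length ≤ k by omega)]
    by_cases h2 : k - acc.length < m
    · simp [h2]
    · rw [List.getElem?_eq_none (show (List.replicate m ([] : List String)).length ≤ k - acc.length by
        rw [List.length_replicate]; omega)]

theorem set_add_not_mem (s : List String) (x : String) (h : x ∉ s) :
    PySem.Set.add s x = s ++ [x] := by
  simp [PySem.Set.add, PySem.Set.contains, h]

-- characterisation of A's fold: bucket k = old bucket k ++ courses with exactly k prereqs, in order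
theorem foldA_getD (ps : List (String × List String)) (acc : List (List String))
    (hnd : (ps.map Prod.fst).Nodup)
    (hdisj : ∀ kv ∈ ps, ∀ b ∈ acc, kv.1 ∉ b) (k : Nat) :
    (ps.foldl svStepA acc).getD k [] =
      acc.getD k [] ++ (ps.filter (fun kv => kv.2.length == k)).map Prod.fst := by
  induction ps generalizing acc with
  | nil => simp
  | cons kv t ih =>
    simp only [List.foldl_cons]
    set n := kv.2.length with hn
    set E := acc ++ List.replicate (n + 1 - acc.length) ([] : List String) with hE
    have hEget : ∀ j, E.getD j [] = acc.getD j [] := fun j => getD_append_replicate _ _ j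
    have hElen : n < E.length := by simp [hE, List.length_append]; omega
    have hbucket : ∀ j, ∀ x ∈ acc.getD j [], x ∈ acc.flatten := by
      intro j x hx
      by_cases hj : j < acc.length
      · exact List.mem_flatten.mpr ⟨acc[j], by
          simp [List.getD, List.getElem?_eq_getElem hj] at hx
          exact ⟨List.getElem_mem hj, by simpa [List.getD, List.getElem?_eq_getElem hj] using hx⟩⟩
      · simp [List.getD, List.getElem?_eq_none (by omega : acc.length ≤ j)] at hx
    have hkv_not : kv.1 ∉ acc.getD n [] := by
      intro hx
      obtain ⟨b, hb, hxb⟩ := List.mem_flatten.mp (hbucket n _ hx)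
      exact hdisj kv List.mem_cons_self b hb hxb
    have hstep : svStepA acc kv
        = E.set n (acc.getD n [] ++ [kv.1]) := by
      simp only [svStepA, ← hn, ← hE, hEget, set_add_not_mem _ _ hkv_not]
    rw [hstep]
    have hcons : (∀ (x : List String), (kv.1, x) ∉ t) ∧ (t.map Prod.fst).Nodup := by
      simpa using hnd
    have hnd' : (t.map Prod.fst).Nodup := hcons.2
    have hne : ∀ kv' ∈ t, kv'.1 ≠ kv.1 := by
      intro kv' h' heq
      exact hcons.1 kv'.2 (by rw [← heq]; simpa using h')
    have hdisj' : ∀ kv' ∈ t, ∀ b ∈ E.set n (acc.getD n [] ++ [kv.1]), kv'.1 ∉ b := by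
      intro kv' h' b hb hxb
      rcases List.mem_or_eq_of_mem_set hb with hbE | hbeq
      · rcases List.mem_append.mp (hE ▸ hbE) with hba | hbr
        · exact hdisj kv' (List.mem_cons_of_mem _ h') b hba hxb
        · rw [List.eq_of_mem_replicate hbr] at hxb; exact absurd hxb (List.not_mem_nil)
      · subst hbeq
        rcases List.mem_append.mp hxb with hx1 | hx2
        · obtain ⟨b2, hb2, hxb2⟩ := List.mem_flatten.mp (hbucket n _ hx1)
          exact hdisj kv' (List.mem_cons_of_mem _ h') b2 hb2 hxb2
        · exact hne kv' h' (by simpa using hx2)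
    rw [ih _ hnd' hdisj']
    by_cases hk : k = n
    · subst hk
      rw [List.getD, List.getElem?_set_self (by omega), Option.getD_some]
      rw [List.filter_cons_of_pos (by simp [hn]), List.map_cons, List.append_assoc]
      rfl
    · rw [List.getD, List.getElem?_set_ne (by omega), ← List.getD, hEget k]
      rw [List.filter_cons_of_neg (by simp [← hn]; omega)]

-- length of A's fold (running max + 1)
theorem foldA_length (ps : List (String × List String)) :
    (ps.foldl svStepA [[]]).length = ps.foldl (fun m kv => max m kv.2.length) 0 + 1 := by
  have : ∀ (l : List (String × List String)) (a : List (List String)),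
      (l.foldl svStepA a).length = l.foldl (fun m kv => max m (kv.2.length + 1)) a.length := by
    intro l
    induction l with
    | nil => intro a; rfl
    | cons x t ih => intro a; simp only [List.foldl_cons, ih, svStepA_length]
  rw [this ps [[]]]
  simpa using foldl_max_shift ps 0

-- ===== VERDICT (by name: the statement is the Claim_ definition above) =====
theorem sort_courses_by_prereq_count_by_radix_spec : Claim_equal_sort_courses_by_prereq_count_by_radix := by
  intro cps _
  unfold Spec_sort_courses_by_prereq_count_by_radix
  have hnd : (PySem.Dict.ofList cps).keys.Nodup := PySem.Dict.nodup_keys_ofList cps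
  set ps := (PySem.Dict.ofList cps).items with hps
  have hndps : (ps.map Prod.fst).Nodup := by simpa [PySem.Dict.keys] using hnd
  set M := ps.foldl (fun m kv => max m kv.2.length) 0 with hM
  -- reduce B's max_count to M
  have hvals : (PySem.Dict.ofList cps).values.map (fun p => ((p.length : Int)))
      = ps.map (fun kv => ((kv.2.length : Int))) := by
    simp only [PySem.Dict.values, List.map_map]; rfl
  have hmax : ((PySem.List.max? (ps.map (fun kv => ((kv.2.length : Int)))) (fun x => x)).getD 0)
      = ((M : Nat) : Int) := by
    cases h : ps with
    | nil => simp [hM, h, PySem.List.max?]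
    | cons kv t =>
      simp only [List.map_cons, PySem.List.max?_id_cons, Option.getD_some, hM, h, List.foldl_cons]
      rw [foldl_max_cast t kv.2.length]
      simp
  have hBexp : sort_courses_by_prereq_count_by_radix_alt cps
      = (PySem.List.pyRange 0 (((M + 1 : Nat)) : Int) 1).map
          (fun k => PySem.Set.ofList ((ps.filter (fun kv => ((kv.2.length : Int)) == k)).map Prod.fst)) := by
    show ((PySem.List.pyRange 0
        ((PySem.List.max? ((PySem.Dict.ofList cps).values.map (fun p => ((p.length : Int)))) (fun x => x)).getD 0 + 1) 1).map
        (fun k => PySem.Set.ofList ((ps.filter (fun kv => ((kv.2.length : Int)) == k)).map Prod.fst)))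
      = _
    rw [hvals, hmax]
    norm_num
  rw [portA_eq, hBexp, ← hps]
  have hlenA : (ps.foldl svStepA [[]]).length = M + 1 := foldA_length ps
  have hlenB : ((PySem.List.pyRange 0 (((M + 1 : Nat)) : Int) 1).map
      (fun k => PySem.Set.ofList ((ps.filter (fun kv => ((kv.2.length : Int)) == k)).map Prod.fst))).length
      = M + 1 := by
    rw [List.length_map, PySem.List.length_pyRange_one]
    omega
  apply List.ext_getElem (by rw [hlenA, hlenB])
  intro k hk1 hk2
  have hkM : k < M + 1 := by omega
  -- A side
  have hA : (ps.foldl svStepA [[]])[k] = (ps.filter (fun kv => kv.2.length == k)).map Prod.fst := by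
    have h0 : ([([] : List String)] : List (List String)).getD k [] = [] := by
      cases k <;> rfl
    have hgd := foldA_getD ps [[]] hndps (by intro kv _ b hb; simp at hb; simp [hb]) k
    rw [h0, List.nil_append] at hgd
    rw [List.getD, List.getElem?_eq_getElem hk1, Option.getD_some] at hgd
    exact hgd
  -- B side
  have hB : ((PySem.List.pyRange 0 (((M + 1 : Nat)) : Int) 1).map
      (fun j => PySem.Set.ofList ((ps.filter (fun kv => ((kv.2.length : Int)) == j)).map Prod.fst)))[k]
      = PySem.Set.ofList ((ps.filter (fun kv => ((kv.2.length : Int)) == ((k : Nat) : Int))).map Prod.fst) := by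
    have hget := PySem.List.getElem?_map_pyRange_zero
      (fun j => PySem.Set.ofList ((ps.filter (fun kv => ((kv.2.length : Int)) == j)).map Prod.fst))
      (M + 1) k hkM
    rw [List.getElem?_eq_getElem hk2, Option.some_inj] at hget
    exact hget
  rw [hA, hB]
  have hfilter : ps.filter (fun kv => ((kv.2.length : Int)) == ((k : Nat) : Int))
      = ps.filter (fun kv => kv.2.length == k) := by
    apply List.filter_congr
    intro kv _
    simp
  rw [hfilter]
  have hsub : ((ps.filter (fun kv => kv.2.length == k)).map Prod.fst).Nodup :=
    hndps.sublist (List.Sublist.map Prod.fst List.filter_sublist)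
  exact (PySem.Set.ofList_eq_self_of_nodup _ hsub).symm
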